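-- pv_equiv track=rewrite | github.com/rtviii/ribetl | ciftools/transpose_ligand.py | backwards_match
-- ===== SOURCE A (Python) =====
-- def backwards_match(alntgt:str, resid:int):
-- 	"""Returns the target-sequence  index of a residue in the (aligned) target sequence"""
-- 	counter_proper = 0
-- 	for i,char in enumerate(alntgt):
-- 		if i == resid:
-- 			if char == "-":
-- 				return None
-- 			return counter_proper
-- 		if char =='-':
-- 			continue
-- 		else:
-- 			counter_proper  +=1
-- ===== SOURCE B (Python) =====
-- def backwards_match(alntgt: str, resid: int):
--     """Returns the target-sequence index of a residue in the (aligned) target sequence"""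
--     index_of = {}
--     k = 0
--     for i, char in enumerate(alntgt):
--         if char != '-':
--             index_of[i] = k
--             k += 1
--     return index_of.get(resid)
-- ===== Notes on version B (the rewrite author's own statement) =====
-- stated objective: alternative
-- what changed: B builds a complete dictionary mapping each non-gap aligned position to its ungapped index in one full pass and answers the query by a single dict lookup, instead of A's walk that counts while scanning and returns early at the queried index.
import Mathlib
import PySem

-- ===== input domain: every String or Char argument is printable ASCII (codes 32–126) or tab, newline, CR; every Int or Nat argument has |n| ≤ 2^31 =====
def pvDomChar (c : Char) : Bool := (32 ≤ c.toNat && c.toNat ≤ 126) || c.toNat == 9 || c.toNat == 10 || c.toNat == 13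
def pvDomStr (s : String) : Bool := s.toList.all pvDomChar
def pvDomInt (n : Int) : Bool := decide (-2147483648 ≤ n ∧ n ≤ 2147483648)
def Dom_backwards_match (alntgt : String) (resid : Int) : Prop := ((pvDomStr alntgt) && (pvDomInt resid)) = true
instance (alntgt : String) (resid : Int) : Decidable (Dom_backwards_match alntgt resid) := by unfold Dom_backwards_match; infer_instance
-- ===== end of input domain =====

-- B replaces A's counting walk with an early return by building the full
-- position→ungapped-index dictionary and answering with one lookup (objective: alternative).

-- ===== PORT A =====
-- A's 'for i, char in enumerate(alntgt)' loop: i, resid and counter_proper carried as state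
def bmLoop : List Char → Int → Int → Int → Option Int
  | [], _, _, _ => none
  | c :: rest, i, resid, counter =>
    if i = resid then (if c = '-' then none else some counter)
    else if c = '-' then bmLoop rest (i + 1) resid counter
    else bmLoop rest (i + 1) resid (counter + 1)

def backwards_match (alntgt : String) (resid : Int) : Option Int :=
  bmLoop alntgt.toList 0 resid 0

-- ===== PORT B =====
-- B's dictionary-building loop: i and k carried as state, dict accumulated
def bmBuild : List Char → Int → Int → PySem.Dict Int Int → PySem.Dict Int Int
  | [], _, _, d => d
  | c :: rest, i, k, d =>
    if c ≠ '-' then bmBuild rest (i + 1) (k + 1) (d.insert i k)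
    else bmBuild rest (i + 1) k d

def backwards_match_alt (alntgt : String) (resid : Int) : Option Int :=
  (bmBuild alntgt.toList 0 0 PySem.Dict.empty).get? resid

-- ===== PRECONDITION & SPEC =====
def Spec_backwards_match (alntgt : String) (resid : Int) (out : Option Int) : Prop := out = backwards_match_alt alntgt resid
instance (alntgt : String) (resid : Int) (out : Option Int) : Decidable (Spec_backwards_match alntgt resid out) := by unfold Spec_backwards_match; infer_instance

-- ===== CLAIM =====
def Claim_equal_backwards_match : Prop := ∀ (alntgt : String) (resid : Int), Dom_backwards_match alntgt resid → Spec_backwards_match alntgt resid (backwards_match alntgt resid)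

-- ===== LEMMAS AND PROOFS =====

-- B's loop only inserts keys ≥ i, so lookups below i are untouched
theorem bmBuild_get?_lt (cs : List Char) : ∀ (i k r : Int) (d : PySem.Dict Int Int),
    r < i → (bmBuild cs i k d).get? r = d.get? r := by
  induction cs with
  | nil => intro i k r d _; rfl
  | cons hd tl ih =>
    intro i k r d hr
    by_cases h : hd = '-'
    · simp only [bmBuild, h]
      simp only [if_neg (by simp : ¬('-' ≠ '-'))]
      exact ih (i + 1) k r d (by omega)
    · simp only [bmBuild, if_pos h]
      rw [ih (i + 1) (k + 1) r (d.insert i k) (by omega),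
          PySem.Dict.get?_insert_of_ne d k (by omega : r ≠ i)]

-- main invariant: the dict lookup of the rest of the loop agrees with A's loop
theorem bmBuild_eq_bmLoop (cs : List Char) : ∀ (i k r : Int) (d : PySem.Dict Int Int),
    d.get? r = none → (bmBuild cs i k d).get? r = bmLoop cs i r k := by
  induction cs with
  | nil => intro i k r d hd; simpa [bmBuild, bmLoop] using hd
  | cons hd tl ih =>
    intro i k r d hnone
    by_cases hdash : hd = '-'
    · -- gap column: neither side records anything at i
      simp only [bmBuild, bmLoop, hdash]
      simp only [if_neg (by simp : ¬('-' ≠ '-'))]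
      by_cases hir : i = r
      · subst hir
        rw [bmBuild_get?_lt tl (i + 1) k i d (by omega), hnone]
        simp
      · simp only [if_neg hir, if_true]
        exact ih (i + 1) k r d hnone
    · -- residue column
      simp only [bmBuild, bmLoop, if_pos hdash]
      by_cases hir : i = r
      · subst hir
        rw [bmBuild_get?_lt tl (i + 1) (k + 1) i (d.insert i k) (by omega),
            PySem.Dict.get?_insert_self]
        simp [hdash]
      · rw [if_neg hir, if_neg hdash]
        exact ih (i + 1) (k + 1) r (d.insert i k)
          (by rw [PySem.Dict.get?_insert_of_ne d k (by omega : r ≠ i)]; exact hnone)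

-- ===== VERDICT =====
theorem backwards_match_spec : Claim_equal_backwards_match := by
  intro alntgt resid _
  unfold Spec_backwards_match backwards_match backwards_match_alt
  rw [bmBuild_eq_bmLoop alntgt.toList 0 0 resid PySem.Dict.empty (by simp)]
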